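-- pv_equiv track=rewrite | github.com/Likhita-P/rag-ops-platform | app/llm_client.py | rules_based_answer
-- ===== SOURCE A (Python) =====
-- def rules_based_answer(question: str, context: str) -> str:
--     q_lower = question.lower()
--
--     if any(kw in q_lower for kw in ["maximum", "limit", "cap"]):
--         for line in context.split("\n"):
--             if any(kw in line.lower() for kw in ["maximum", "limit", "$", "usd"]):
--                 return f"[Fallback] Based on document: {line.strip()}"
--
--     if any(kw in q_lower for kw in ["covered", "coverage", "eligible"]):
--         for line in context.split("\n"):
--             if "covered" in line.lower() or "eligible" in line.lower():
--                 return f"[Fallback] Based on document: {line.strip()}"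
--
--     if any(kw in q_lower for kw in ["name", "who", "candidate"]):
--         for line in context.split("\n"):
--             line = line.strip()
--             if line and len(line.split()) <= 5 and line[0].isupper():
--                 return f"[Fallback] Based on document: {line}"
--
--     return (
--         "[Fallback] The AI service is temporarily unavailable. "
--         "Please refer to the document directly for your answer."
--     )
-- ===== SOURCE B (Python) =====
-- def rules_based_answer(question: str, context: str) -> str:
--     # One pass over the context: record the first line matching each branch's
--     # predicate (predicates are question-independent), then select by branch
--     # priority among branches whose question keywords fire.
--     hit1 = hit2 = hit3 = None
--     for line in context.split("\n"):
--         low = line.lower()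
--         s = line.strip()
--         if hit1 is None and any(k in low for k in ("maximum", "limit", "$", "usd")):
--             hit1 = s
--         if hit2 is None and ("covered" in low or "eligible" in low):
--             hit2 = s
--         if hit3 is None and s and len(s.split()) <= 5 and s[0].isupper():
--             hit3 = s
--
--     q = question.lower()
--     for keywords, hit in (
--         (("maximum", "limit", "cap"), hit1),
--         (("covered", "coverage", "eligible"), hit2),
--         (("name", "who", "candidate"), hit3),
--     ):
--         if hit is not None and any(k in q for k in keywords):
--             return "[Fallback] Based on document: " + hit
--     return (
--         "[Fallback] The AI service is temporarily unavailable. "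
--         "Please refer to the document directly for your answer."
--     )
-- ===== Notes on version B (the rewrite author's own statement) =====
-- stated objective: alternative
-- what changed: Instead of A's up-to-three staged rescans of the context (one per triggered question branch), B makes a single pass over the lines accumulating the first match for all three line predicates at once, then a separate priority-selection step over the question keywords; fall-through (hit is None) and each branch's exact predicate and stripped output are preserved.
import Mathlib
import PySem

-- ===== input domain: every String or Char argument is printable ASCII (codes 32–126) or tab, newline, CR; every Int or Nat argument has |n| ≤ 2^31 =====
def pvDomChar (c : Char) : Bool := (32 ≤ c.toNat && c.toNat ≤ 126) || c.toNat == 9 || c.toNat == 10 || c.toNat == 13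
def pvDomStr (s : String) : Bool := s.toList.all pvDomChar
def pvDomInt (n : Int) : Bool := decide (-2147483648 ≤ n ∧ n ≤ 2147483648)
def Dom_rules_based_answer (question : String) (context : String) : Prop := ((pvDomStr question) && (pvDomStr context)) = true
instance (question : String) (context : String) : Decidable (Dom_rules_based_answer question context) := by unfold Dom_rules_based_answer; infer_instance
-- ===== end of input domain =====

-- B replaces A's up-to-three staged rescans of the context by one single pass accumulating the
-- first match of each line predicate, followed by a priority-selection step (objective: alternative).

-- ===== PORT A =====
-- A's first for-loop: first line containing any money/limit keyword
def pvALoop1 : List String → Option String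
  | [] => none
  | line :: rest =>
    if ["maximum", "limit", "$", "usd"].any (fun kw => PySem.Str.isIn kw (PySem.Str.lower line)) then
      some ("[Fallback] Based on document: " ++ PySem.Str.strip line)
    else pvALoop1 rest

-- A's second for-loop: first line containing "covered" or "eligible"
def pvALoop2 : List String → Option String
  | [] => none
  | line :: rest =>
    if PySem.Str.isIn "covered" (PySem.Str.lower line) || PySem.Str.isIn "eligible" (PySem.Str.lower line) then
      some ("[Fallback] Based on document: " ++ PySem.Str.strip line)
    else pvALoop2 rest

-- A's third for-loop: line := line.strip(); short non-empty line starting with an uppercase letter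
def pvALoop3 : List String → Option String
  | [] => none
  | line :: rest =>
    let l := PySem.Str.strip line
    if (!l.toList.isEmpty) && decide ((PySem.Str.split₀ l).length ≤ 5) &&
        (match l.toList with | [] => false | c :: _ => PySem.Chars.isupper c) then
      some ("[Fallback] Based on document: " ++ l)
    else pvALoop3 rest

def rules_based_answer (question : String) (context : String) : String :=
  let q_lower := PySem.Str.lower question
  let lines := (PySem.Str.split? context "\n").getD []
  let r1 : Option String :=
    if ["maximum", "limit", "cap"].any (fun kw => PySem.Str.isIn kw q_lower) then pvALoop1 lines else none
  match r1 with
  | some r => r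
  | none =>
    let r2 : Option String :=
      if ["covered", "coverage", "eligible"].any (fun kw => PySem.Str.isIn kw q_lower) then pvALoop2 lines else none
    match r2 with
    | some r => r
    | none =>
      let r3 : Option String :=
        if ["name", "who", "candidate"].any (fun kw => PySem.Str.isIn kw q_lower) then pvALoop3 lines else none
      match r3 with
      | some r => r
      | none =>
        "[Fallback] The AI service is temporarily unavailable. Please refer to the document directly for your answer."

-- ===== PORT B =====
-- line predicates (exactly the three branch predicates)
def pvPred1 (line : String) : Bool :=
  ["maximum", "limit", "$", "usd"].any (fun kw => PySem.Str.isIn kw (PySem.Str.lower line))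

def pvPred2 (line : String) : Bool :=
  PySem.Str.isIn "covered" (PySem.Str.lower line) || PySem.Str.isIn "eligible" (PySem.Str.lower line)

def pvPred3 (line : String) : Bool :=
  let s := PySem.Str.strip line
  (!s.toList.isEmpty) && decide ((PySem.Str.split₀ s).length ≤ 5) &&
    (match s.toList with | [] => false | c :: _ => PySem.Chars.isupper c)

-- single-pass loop body: keep the first (stripped) line matching each predicate
def pvStep (st : Option String × Option String × Option String) (line : String) :
    Option String × Option String × Option String :=
  let s := PySem.Str.strip line
  ( if st.1.isNone && pvPred1 line then some s else st.1,
    if st.2.1.isNone && pvPred2 line then some s else st.2.1,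
    if st.2.2.isNone && pvPred3 line then some s else st.2.2 )

-- priority selection over (question keywords, recorded hit) pairs
def pvSelect (q : String) : List (List String × Option String) → String
  | [] => "[Fallback] The AI service is temporarily unavailable. Please refer to the document directly for your answer."
  | (kws, hit) :: rest =>
    match hit with
    | some h => if kws.any (fun kw => PySem.Str.isIn kw q) then "[Fallback] Based on document: " ++ h
                else pvSelect q rest
    | none => pvSelect q rest

def rules_based_answer_alt (question : String) (context : String) : String :=
  let st := ((PySem.Str.split? context "\n").getD []).foldl pvStep (none, none, none)
  pvSelect (PySem.Str.lower question)
    [ (["maximum", "limit", "cap"], st.1),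
      (["covered", "coverage", "eligible"], st.2.1),
      (["name", "who", "candidate"], st.2.2) ]

-- ===== PRECONDITION & SPEC =====
def Spec_rules_based_answer (question : String) (context : String) (out : String) : Prop := out = rules_based_answer_alt question context
instance (question : String) (context : String) (out : String) : Decidable (Spec_rules_based_answer question context out) := by unfold Spec_rules_based_answer; infer_instance

-- ===== CLAIM (what is proved, stated in full; the proofs are below) =====
def Claim_equal_rules_based_answer : Prop := ∀ (question : String) (context : String), Dom_rules_based_answer question context → Spec_rules_based_answer question context (rules_based_answer question context)

-- ===== LEMMAS AND PROOFS =====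
lemma pvALoop1_eq (lines : List String) :
    pvALoop1 lines = (lines.find? pvPred1).map (fun l => "[Fallback] Based on document: " ++ PySem.Str.strip l) := by
  induction lines with
  | nil => rfl
  | cons line rest ih =>
    show (if pvPred1 line then _ else pvALoop1 rest) = _
    cases h : pvPred1 line <;> simp [h, ih]

lemma pvALoop2_eq (lines : List String) :
    pvALoop2 lines = (lines.find? pvPred2).map (fun l => "[Fallback] Based on document: " ++ PySem.Str.strip l) := by
  induction lines with
  | nil => rfl
  | cons line rest ih =>
    show (if pvPred2 line then _ else pvALoop2 rest) = _
    cases h : pvPred2 line <;> simp [h, ih]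

lemma pvALoop3_eq (lines : List String) :
    pvALoop3 lines = (lines.find? pvPred3).map (fun l => "[Fallback] Based on document: " ++ PySem.Str.strip l) := by
  induction lines with
  | nil => rfl
  | cons line rest ih =>
    show (if pvPred3 line then _ else pvALoop3 rest) = _
    cases h : pvPred3 line <;> simp [h, ih]

-- the single pass computes, in each component, the first match of the corresponding predicate
lemma pvFold_eq (lines : List String) (a b c : Option String) :
    lines.foldl pvStep (a, b, c) =
      ( a.orElse (fun _ => (lines.find? pvPred1).map PySem.Str.strip),
        b.orElse (fun _ => (lines.find? pvPred2).map PySem.Str.strip),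
        c.orElse (fun _ => (lines.find? pvPred3).map PySem.Str.strip) ) := by
  induction lines generalizing a b c with
  | nil => cases a <;> cases b <;> cases c <;> rfl
  | cons line rest ih =>
    simp only [List.foldl_cons, pvStep, ih]
    cases a <;> cases b <;> cases c <;>
      cases h1 : pvPred1 line <;> cases h2 : pvPred2 line <;> cases h3 : pvPred3 line <;>
      simp [h1, h2, h3, Option.orElse]

-- ===== VERDICT (by name: the statement is the Claim_ definition above) =====
theorem rules_based_answer_spec : Claim_equal_rules_based_answer := by
  intro question context _
  unfold Spec_rules_based_answer rules_based_answer rules_based_answer_alt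
  simp only [pvALoop1_eq, pvALoop2_eq, pvALoop3_eq, pvFold_eq]
  by_cases h1 : (["maximum", "limit", "cap"].any fun kw => PySem.Str.isIn kw (PySem.Str.lower question)) = true <;>
  by_cases h2 : (["covered", "coverage", "eligible"].any fun kw => PySem.Str.isIn kw (PySem.Str.lower question)) = true <;>
  by_cases h3 : (["name", "who", "candidate"].any fun kw => PySem.Str.isIn kw (PySem.Str.lower question)) = true <;>
  simp only [h1, h2, h3, if_pos, pvSelect] <;>
  cases hf1 : ((PySem.Str.split? context "\n").getD []).find? pvPred1 <;>
  cases hf2 : ((PySem.Str.split? context "\n").getD []).find? pvPred2 <;>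
  cases hf3 : ((PySem.Str.split? context "\n").getD []).find? pvPred3 <;>
  simp_all [Option.orElse]
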